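-- pv_equiv track=rewrite | github.com/R-C-Group/MASt3R-Fusion-comment | main.py | find_valid_numbers
-- ===== SOURCE A (Python) =====
-- def find_valid_numbers(a, b):
--     result = []
--     for i, c in enumerate(b):
--         if abs(c - a) <= 1:
--             continue
--         close_indices = [j for j, d in enumerate(b) if abs(d - c) <= 20]
--         if i == min(close_indices) or c == a - 2 :
--             result.append(c)
--     return result
-- ===== SOURCE B (Python) =====
-- def find_valid_numbers(a, b):
--     # One pass: remember previously seen values in a hash set; an element is the
--     # earliest within +-20 iff none of the 41 values c-20..c+20 was seen before it.
--     result = []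
--     seen = set()
--     for c in b:
--         if abs(c - a) <= 1:
--             seen.add(c)
--             continue
--         if all(c + d not in seen for d in range(-20, 21)) or c == a - 2:
--             result.append(c)
--         seen.add(c)
--     return result
-- ===== Notes on version B (the rewrite author's own statement) =====
-- stated objective: faster
-- what changed: A rescans the whole list for every element and takes the min of the matching indices (O(n^2)); B makes a single pass keeping the previously seen values in a hash set and tests 'earliest within +-20' by probing the 41 values c-20..c+20 against that set.
import Mathlib
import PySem

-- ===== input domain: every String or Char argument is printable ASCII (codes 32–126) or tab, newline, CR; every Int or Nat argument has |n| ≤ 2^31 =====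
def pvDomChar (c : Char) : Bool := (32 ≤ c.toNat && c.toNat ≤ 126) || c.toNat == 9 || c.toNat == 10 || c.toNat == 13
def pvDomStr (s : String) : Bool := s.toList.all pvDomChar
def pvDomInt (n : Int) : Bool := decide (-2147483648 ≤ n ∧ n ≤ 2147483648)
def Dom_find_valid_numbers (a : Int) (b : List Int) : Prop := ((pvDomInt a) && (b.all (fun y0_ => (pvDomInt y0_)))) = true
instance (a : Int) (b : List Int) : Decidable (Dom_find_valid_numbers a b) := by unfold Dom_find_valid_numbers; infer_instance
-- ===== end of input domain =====

-- B replaces A's quadratic "rescan the whole list and take the min index" test by a single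
-- pass that keeps the previously seen values in a set and probes the 41 values c-20..c+20.

-- ===== PORT A =====
def find_valid_numbers (a : Int) (b : List Int) : List Int :=
  (PySem.List.enumerate b 0).foldl (fun result ic =>
    let i := ic.1
    let c := ic.2
    if |c - a| ≤ 1 then result
    else
      let close_indices :=
        ((PySem.List.enumerate b 0).filter (fun jd => decide (|jd.2 - c| ≤ 20))).map (·.1)
      -- 'min(close_indices)': close_indices always contains i, so Python's min never raises
      if PySem.List.min? close_indices (fun x => x) = some i ∨ c = a - 2 then result ++ [c]
      else result) []

-- ===== PORT B =====
def find_valid_numbers_alt (a : Int) (b : List Int) : List Int :=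
  (b.foldl (fun (st : PySem.Set Int × List Int) c =>
    let seen := st.1
    let result := st.2
    if |c - a| ≤ 1 then (PySem.Set.add seen c, result)
    else if ((PySem.List.pyRange (-20) 21 1).all
               (fun d => !(PySem.Set.contains seen (c + d)))) || decide (c = a - 2) then
      (PySem.Set.add seen c, result ++ [c])
    else (PySem.Set.add seen c, result)) (PySem.Set.empty, [])).2

-- ===== PRECONDITION & SPEC =====
def Spec_find_valid_numbers (a : Int) (b : List Int) (out : List Int) : Prop := out = find_valid_numbers_alt a b
instance (a : Int) (b : List Int) (out : List Int) : Decidable (Spec_find_valid_numbers a b out) := by unfold Spec_find_valid_numbers; infer_instance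

-- ===== CLAIM (what is proved, stated in full; the proofs are below) =====
def Claim_equal_find_valid_numbers : Prop := ∀ (a : Int) (b : List Int), Dom_find_valid_numbers a b → Spec_find_valid_numbers a b (find_valid_numbers a b)

-- ===== LEMMAS AND PROOFS =====


def farFromPrefix (pre : List Int) (c : Int) : Bool := pre.all (fun p => decide (20 < |p - c|))

lemma far_iff (pre : List Int) (c : Int) :
    farFromPrefix pre c = true ↔ ∀ p ∈ pre, 20 < |p - c| := by
  simp [farFromPrefix, List.all_eq_true]

def stepB (a : Int) (st : PySem.Set Int × List Int) (c : Int) : PySem.Set Int × List Int :=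
  if |c - a| ≤ 1 then (PySem.Set.add st.1 c, st.2)
  else if ((PySem.List.pyRange (-20) 21 1).all
             (fun d => !(PySem.Set.contains st.1 (c + d)))) || decide (c = a - 2) then
    (PySem.Set.add st.1 c, st.2 ++ [c])
  else (PySem.Set.add st.1 c, st.2)

def QA (a : Int) (b : List Int) (ic : Int × Int) : Bool :=
  !(decide (|ic.2 - a| ≤ 1)) && (farFromPrefix (b.take ic.1.toNat) ic.2 || decide (ic.2 = a - 2))

lemma alt_eq_stepB (a : Int) (b : List Int) :
    find_valid_numbers_alt a b = (b.foldl (stepB a) (PySem.Set.empty, [])).2 := rfl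

lemma probe_eq_far (pre : List Int) (c : Int) :
    ((PySem.List.pyRange (-20) 21 1).all
        (fun d => !(PySem.Set.contains (PySem.Set.ofList pre) (c + d))))
      = farFromPrefix pre c := by
  rw [← Bool.coe_iff_coe, far_iff]
  simp only [List.all_eq_true, PySem.List.mem_pyRange_one, Bool.not_eq_eq_eq_not, Bool.not_true]
  constructor
  · intro h p hp
    by_contra hlt
    push_neg at hlt
    obtain ⟨g1, g2⟩ := abs_le.mp hlt
    have := h (p - c) ⟨by omega, by omega⟩
    rw [show c + (p - c) = p by ring] at this
    simp [PySem.Set.mem_ofList, hp] at this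
  · intro h d hd
    have : ¬ (c + d ∈ pre) := by
      intro hm
      have := h _ hm
      rw [show c + d - c = d by ring] at this
      rcases abs_cases d with ⟨he, _⟩ | ⟨he, _⟩ <;> omega
    simp [PySem.Set.mem_ofList, this]

lemma mem_close (b : List Int) (c m : Int) :
    m ∈ ((PySem.List.enumerate b 0).filter
            (fun jd => decide (|jd.2 - c| ≤ 20))).map (·.1)
    ↔ ∃ (j : Nat) (hj : j < b.length), m = (j : Int) ∧ |b[j] - c| ≤ 20 := by
  simp only [List.mem_map, List.mem_filter, PySem.List.mem_enumerate_iff, decide_eq_true_eq]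
  constructor
  · rintro ⟨⟨mi, mc⟩, ⟨⟨j, hj, hp⟩, habs⟩, rfl⟩
    cases hp
    exact ⟨j, hj, by simp, habs⟩
  · rintro ⟨j, hj, rfl, habs⟩
    exact ⟨((j : Int), b[j]), ⟨⟨j, hj, by simp⟩, habs⟩, rfl⟩

lemma min_close_iff (b : List Int) (k : Nat) (hk : k < b.length) :
    PySem.List.min?
        (((PySem.List.enumerate b 0).filter
            (fun jd => decide (|jd.2 - b[k]| ≤ 20))).map (·.1)) (fun x => x)
      = some (k : Int)
    ↔ farFromPrefix (b.take k) b[k] = true := by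
  rw [far_iff]
  set L := ((PySem.List.enumerate b 0).filter
            (fun jd => decide (|jd.2 - b[k]| ≤ 20))).map (·.1) with hL
  have hkL : (k : Int) ∈ L := (mem_close b b[k] _).mpr ⟨k, hk, rfl, by simp⟩
  constructor
  · intro hmin p hp
    obtain ⟨j, hjk, hjb⟩ : ∃ j, ∃ _ : j < min k b.length, b[j] = p := by
      simpa using (List.mem_take_iff_getElem).mp hp
    by_contra hlt
    push_neg at hlt
    have hjL : (j : Int) ∈ L := (mem_close b b[k] _).mpr ⟨j, by omega, rfl, by
      simp only [hjb]; exact hlt⟩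
    have := PySem.List.min?_isMin hmin (j : Int) hjL
    simp at this
    omega
  · intro hfar
    obtain ⟨m, hm⟩ : ∃ m, PySem.List.min? L (fun x => x) = some m := by
      cases h : PySem.List.min? L (fun x => x) with
      | none => exact absurd ((PySem.List.min?_eq_none_iff L (fun x => x)).mp h) (List.ne_nil_of_mem hkL)
      | some m => exact ⟨m, rfl⟩
    obtain ⟨j, hj, rfl, habs⟩ := (mem_close b b[k] m).mp (PySem.List.min?_mem hm)
    have hle := PySem.List.min?_isMin hm (k : Int) hkL
    simp at hle
    have hkj : k ≤ j := by
      by_contra h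
      push_neg at h
      have : b[j] ∈ b.take k := List.mem_take_iff_getElem.mpr ⟨j, by omega, rfl⟩
      have := hfar _ this
      omega
    have : j = k := by omega
    subst this
    exact hm

lemma ofList_concat (pre : List Int) (c : Int) :
    PySem.Set.ofList (pre ++ [c]) = PySem.Set.add (PySem.Set.ofList pre) c := by
  simp [PySem.Set.ofList_eq_foldl, List.foldl_append]

lemma main_loop (a : Int) (b : List Int) :
    ∀ (rest pre res : List Int), b = pre ++ rest →
    ((rest.foldl (stepB a) (PySem.Set.ofList pre, res)).2)
      = res ++ ((PySem.List.enumerate rest (pre.length : Int)).filter (QA a b)).map (·.2) := by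
  intro rest
  induction rest with
  | nil => intro pre res hb; simp [PySem.List.enumerate]
  | cons c t ih =>
    intro pre res hb
    rw [PySem.List.enumerate_cons]
    have htake : b.take pre.length = pre := by
      rw [hb]; simpa using List.take_left (l₁ := pre) (l₂ := c :: t)
    have hb' : b = (pre ++ [c]) ++ t := by simp [hb]
    have hQ : QA a b ((pre.length : Int), c)
        = (!(decide (|c - a| ≤ 1)) && (farFromPrefix pre c || decide (c = a - 2))) := by
      simp [QA, htake]
    by_cases h1 : |c - a| ≤ 1
    · rw [List.foldl_cons, show stepB a (PySem.Set.ofList pre, res) c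
          = (PySem.Set.ofList (pre ++ [c]), res) by simp [stepB, h1, ofList_concat]]
      rw [ih (pre ++ [c]) res hb', List.filter_cons, hQ]
      simp [h1]
    · by_cases h2 : (farFromPrefix pre c || decide (c = a - 2)) = true
      · rw [List.foldl_cons, show stepB a (PySem.Set.ofList pre, res) c
            = (PySem.Set.ofList (pre ++ [c]), res ++ [c]) by
              simp only [stepB, if_neg h1, probe_eq_far, h2, if_pos]; rw [ofList_concat]]
        rw [ih (pre ++ [c]) (res ++ [c]) hb', List.filter_cons, hQ]
        simp [h1, h2]
      · rw [List.foldl_cons, show stepB a (PySem.Set.ofList pre, res) c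
            = (PySem.Set.ofList (pre ++ [c]), res) by
              simp only [stepB, if_neg h1, probe_eq_far, h2, if_neg, Bool.not_eq_true]
              rw [ofList_concat]]
        rw [ih (pre ++ [c]) res hb', List.filter_cons, hQ]
        simp [h1, h2]

lemma ports_agree (a : Int) (b : List Int) :
    find_valid_numbers a b = find_valid_numbers_alt a b := by
  rw [alt_eq_stepB]
  have hcong : ∀ (acc : List Int) (x : Int × Int), x ∈ PySem.List.enumerate b 0 →
      (fun result ic =>
        let i := ic.1
        let c := ic.2
        if |c - a| ≤ 1 then result
        else
          let close_indices :=
            ((PySem.List.enumerate b 0).filter (fun jd => decide (|jd.2 - c| ≤ 20))).map (·.1)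
          if PySem.List.min? close_indices (fun x => x) = some i ∨ c = a - 2 then result ++ [c]
          else result) acc x
      = (fun acc ic => if QA a b ic then acc ++ [ic.2] else acc) acc x := by
    intro acc x hx
    obtain ⟨k, hk, rfl⟩ := (PySem.List.mem_enumerate_iff _ _ _).mp hx
    simp only [zero_add, QA, Int.toNat_natCast]
    by_cases h1 : |b[k] - a| ≤ 1
    · simp [h1]
    · by_cases h2 : PySem.List.min?
          (((PySem.List.enumerate b 0).filter
              (fun jd => decide (|jd.2 - b[k]| ≤ 20))).map (·.1)) (fun x => x) = some (k : Int)
      · have hfar := (min_close_iff b k hk).mp h2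
        simp [h1, h2, hfar]
      · have hfar : farFromPrefix (b.take k) b[k] = false := by
          rw [Bool.eq_false_iff]
          intro hc
          exact h2 ((min_close_iff b k hk).mpr hc)
        by_cases h3 : b[k] = a - 2
        · simp [h1, h2, h3]
        · simp [h1, h2, h3, hfar]
  have hA : find_valid_numbers a b = ((PySem.List.enumerate b 0).filter (QA a b)).map (·.2) := by
    refine Eq.trans (PySem.List.foldl_congr_mem _ _ _ _ hcong) ?_
    rw [PySem.List.foldl_append_if (QA a b) (·.2)]
    simp
  have hB := main_loop a b b [] [] rfl
  have h0 : PySem.Set.ofList ([] : List Int) = PySem.Set.empty := rfl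
  simp only [List.length_nil, Nat.cast_zero, List.nil_append, h0] at hB
  rw [hA, hB]

-- ===== VERDICT (by name: the statement is the Claim_ definition above) =====
theorem find_valid_numbers_spec : Claim_equal_find_valid_numbers := by
  intro a b _
  unfold Spec_find_valid_numbers
  exact ports_agree a b
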